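-- pv_equiv track=rewrite | github.com/grapheneaffiliate/h4-polytopic-attention | solve_arc2_train_aa.py | solve_00d62c1b
-- ===== SOURCE A (Python) =====
-- from collections import Counter, deque, defaultdict
--
-- def solve_00d62c1b(grid):
--     R, C = len(grid), len(grid[0])
--     out = [row[:] for row in grid]
--     visited = [[False]*C for _ in range(R)]
--     q = deque()
--     for r in range(R):
--         for c in range(C):
--             if (r == 0 or r == R-1 or c == 0 or c == C-1) and grid[r][c] == 0:
--                 if not visited[r][c]:
--                     visited[r][c] = True
--                     q.append((r,c))
--     while q:
--         r, c = q.popleft()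
--         for dr, dc in [(-1,0),(1,0),(0,-1),(0,1)]:
--             nr, nc = r+dr, c+dc
--             if 0 <= nr < R and 0 <= nc < C and not visited[nr][nc] and grid[nr][nc] == 0:
--                 visited[nr][nc] = True
--                 q.append((nr, nc))
--     for r in range(R):
--         for c in range(C):
--             if grid[r][c] == 0 and not visited[r][c]:
--                 out[r][c] = 4
--     return out
-- ===== SOURCE B (Python) =====
-- def solve_00d62c1b(grid):
--     R, C = len(grid), len(grid[0])
--     reach = set()
--     for r in range(R):
--         for c in range(C):
--             if grid[r][c] == 0 and (r == 0 or r == R - 1 or c == 0 or c == C - 1):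
--                 reach.add((r, c))
--     changed = True
--     while changed:
--         changed = False
--         for r in range(R):
--             for c in range(C):
--                 if grid[r][c] == 0 and (r, c) not in reach:
--                     if ((r - 1, c) in reach or (r + 1, c) in reach
--                             or (r, c - 1) in reach or (r, c + 1) in reach):
--                         reach.add((r, c))
--                         changed = True
--     out = []
--     for r, row in enumerate(grid):
--         new = list(row)
--         for c in range(C):
--             if row[c] == 0 and (r, c) not in reach:
--                 new[c] = 4
--         out.append(new)
--     return out
-- ===== Notes on version B (the rewrite author's own statement) =====
-- stated objective: alternative
-- what changed: Replaces the BFS with a deque and visited matrix by a queue-free Gauss-Seidel fixpoint: seed the set of border zeros, then sweep the whole grid repeatedly, adding any zero cell adjacent to an already-reached cell, until a sweep changes nothing.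
import Mathlib
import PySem

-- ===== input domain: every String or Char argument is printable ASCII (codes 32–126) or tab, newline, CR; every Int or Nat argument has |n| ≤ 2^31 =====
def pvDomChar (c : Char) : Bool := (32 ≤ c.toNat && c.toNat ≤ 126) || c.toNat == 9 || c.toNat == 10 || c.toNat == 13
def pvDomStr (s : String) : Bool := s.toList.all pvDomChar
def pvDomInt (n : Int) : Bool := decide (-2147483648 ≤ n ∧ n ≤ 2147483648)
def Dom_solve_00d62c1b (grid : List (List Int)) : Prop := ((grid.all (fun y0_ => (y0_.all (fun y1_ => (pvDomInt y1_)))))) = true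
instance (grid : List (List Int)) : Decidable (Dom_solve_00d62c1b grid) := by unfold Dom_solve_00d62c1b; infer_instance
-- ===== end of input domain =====

-- B replaces A's deque BFS from the border by a queue-free Gauss-Seidel fixpoint (repeated
-- whole-grid sweeps growing the set of border-connected zeros until a sweep changes nothing);
-- equal return values on Pre_ (A mutates nothing observable; both return a fresh grid).

-- shared indexing helper: grid[r][c], used only after 0 ≤ r < R and 0 ≤ c < C are established
def gAt (grid : List (List Int)) (r c : Int) : Int := (grid.getD r.toNat []).getD c.toNat 0

-- the in-bounds cells, and the termination measure for both worklist loops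
def pvUniv (R C : Int) : Finset (Int × Int) :=
  (Finset.range R.toNat ×ˢ Finset.range C.toNat).image (fun p => ((p.1 : Int), (p.2 : Int)))
theorem mem_pvUniv (R C a b : Int) :
    (a, b) ∈ pvUniv R C ↔ (0 ≤ a ∧ a < R) ∧ (0 ≤ b ∧ b < C) := by
  simp only [pvUniv, Finset.mem_image, Finset.mem_product, Finset.mem_range, Prod.exists]
  constructor
  · rintro ⟨m, n, ⟨hm, hn⟩, heq⟩
    rw [Prod.mk.injEq] at heq
    omega
  · rintro ⟨⟨h1, h2⟩, ⟨h3, h4⟩⟩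
    exact ⟨a.toNat, b.toNat, ⟨by omega, by omega⟩, by rw [Prod.mk.injEq]; omega⟩
def pvMu (R C : Int) (st : Finset (Int × Int) × List (Int × Int)) : Nat :=
  2 * (pvUniv R C \ st.1).card + st.2.length

-- ===== PORT A =====
def pvDirs : List (Int × Int) := [(-1, 0), (1, 0), (0, -1), (0, 1)]

-- one neighbour probe of A's BFS inner loop
def procA (grid : List (List Int)) (R C : Int) (x : Int × Int)
    (st : Finset (Int × Int) × List (Int × Int)) (d : Int × Int) :
    Finset (Int × Int) × List (Int × Int) :=
  let nr := x.1 + d.1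
  let nc := x.2 + d.2
  if 0 ≤ nr ∧ nr < R ∧ 0 ≤ nc ∧ nc < C ∧ (nr, nc) ∉ st.1 ∧ gAt grid nr nc = 0 then
    (insert (nr, nc) st.1, st.2 ++ [(nr, nc)])
  else st

theorem procA_mu_le (grid : List (List Int)) (R C : Int) (x : Int × Int)
    (st : Finset (Int × Int) × List (Int × Int)) (d : Int × Int) :
    pvMu R C (procA grid R C x st d) ≤ pvMu R C st := by
  simp only [procA]
  split_ifs with h
  · obtain ⟨h1, h2, h3, h4, h5, h6⟩ := h
    have hp : (x.1 + d.1, x.2 + d.2) ∈ pvUniv R C \ st.1 :=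
      Finset.mem_sdiff.2 ⟨(mem_pvUniv R C _ _).2 ⟨⟨h1, h2⟩, ⟨h3, h4⟩⟩, h5⟩
    have hc : (pvUniv R C \ insert (x.1 + d.1, x.2 + d.2) st.1).card
        = (pvUniv R C \ st.1).card - 1 := by
      rw [Finset.sdiff_insert, Finset.card_erase_of_mem hp]
    have hpos : 0 < (pvUniv R C \ st.1).card := Finset.card_pos.mpr ⟨_, hp⟩
    simp only [pvMu, hc, List.length_append, List.length_cons, List.length_nil]
    omega
  · exact le_refl _

theorem foldA_mu_le (grid : List (List Int)) (R C : Int) (x : Int × Int)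
    (l : List (Int × Int)) (st : Finset (Int × Int) × List (Int × Int)) :
    pvMu R C (l.foldl (procA grid R C x) st) ≤ pvMu R C st := by
  induction l generalizing st with
  | nil => exact le_refl _
  | cons d l ih =>
    exact le_trans (ih (procA grid R C x st d)) (procA_mu_le grid R C x st d)

-- A's while-loop over the deque (visited set × queue)
def bfsA (grid : List (List Int)) (R C : Int)
    (st : Finset (Int × Int) × List (Int × Int)) : Finset (Int × Int) :=
  match h : st.2 with
  | [] => st.1
  | x :: rest => bfsA grid R C (pvDirs.foldl (procA grid R C x) (st.1, rest))
termination_by pvMu R C st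
decreasing_by
  have h1 := foldA_mu_le grid R C x pvDirs (st.1, rest)
  simp only [pvMu] at *
  rw [h]
  simp only [List.length_cons]
  omega

-- A's border-seeding double loop (visited set × queue)
def seedA (grid : List (List Int)) (R C : Int) : Finset (Int × Int) × List (Int × Int) :=
  (PySem.List.pyRange 0 R 1).foldl (fun st r =>
    (PySem.List.pyRange 0 C 1).foldl (fun st c =>
      if (r = 0 ∨ r = R - 1 ∨ c = 0 ∨ c = C - 1) ∧ gAt grid r c = 0 then
        if (r, c) ∉ st.1 then (insert (r, c) st.1, st.2 ++ [(r, c)]) else st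
      else st) st) (∅, [])

def solve_00d62c1b (grid : List (List Int)) : List (List Int) :=
  let R : Int := grid.length
  let C : Int := (grid.headD []).length
  let v := bfsA grid R C (seedA grid R C)
  -- out = copy of grid, then out[r][c] = 4 where grid[r][c]==0 and not visited (c ranges over range(C))
  grid.mapIdx (fun r row => row.mapIdx (fun c x =>
    if (c : Int) < C ∧ x = 0 ∧ ((r : Int), (c : Int)) ∉ v then 4 else x))

-- ===== PORT B =====
-- one cell of a Gauss-Seidel sweep (reach set × changed flag)
def cellB (grid : List (List Int)) (r : Int)
    (st : Finset (Int × Int) × Bool) (c : Int) : Finset (Int × Int) × Bool :=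
  if gAt grid r c = 0 ∧ (r, c) ∉ st.1 ∧
      ((r - 1, c) ∈ st.1 ∨ (r + 1, c) ∈ st.1 ∨ (r, c - 1) ∈ st.1 ∨ (r, c + 1) ∈ st.1) then
    (insert (r, c) st.1, true)
  else st

-- one full sweep of the grid
def passB (grid : List (List Int)) (R C : Int) (reach : Finset (Int × Int)) :
    Finset (Int × Int) × Bool :=
  (PySem.List.pyRange 0 R 1).foldl
    (fun st r => (PySem.List.pyRange 0 C 1).foldl (cellB grid r) st) (reach, false)

theorem cellB_grow (grid : List (List Int)) (R C : Int) (reach : Finset (Int × Int))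
    (r c : Int) (hr1 : 0 ≤ r) (hr2 : r < R) (hc1 : 0 ≤ c) (hc2 : c < C)
    (st : Finset (Int × Int) × Bool)
    (h1 : reach ⊆ st.1)
    (h2 : st.2 = true → (pvUniv R C \ st.1).card < (pvUniv R C \ reach).card) :
    reach ⊆ (cellB grid r st c).1 ∧
      ((cellB grid r st c).2 = true →
        (pvUniv R C \ (cellB grid r st c).1).card < (pvUniv R C \ reach).card) := by
  unfold cellB
  split_ifs with h
  · refine ⟨h1.trans (Finset.subset_insert _ _), fun _ => ?_⟩
    have hp : (r, c) ∈ pvUniv R C \ reach :=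
      Finset.mem_sdiff.2 ⟨(mem_pvUniv R C r c).2 ⟨⟨hr1, hr2⟩, ⟨hc1, hc2⟩⟩,
        fun hm => h.2.1 (h1 hm)⟩
    have hsub : pvUniv R C \ insert (r, c) st.1 ⊆ (pvUniv R C \ reach).erase (r, c) := by
      intro y hy
      simp only [Finset.mem_sdiff, Finset.mem_insert, not_or] at hy
      simp only [Finset.mem_erase, Finset.mem_sdiff]
      exact ⟨hy.2.1, hy.1, fun hm => hy.2.2 (h1 hm)⟩
    calc (pvUniv R C \ insert (r, c) st.1).card
        ≤ ((pvUniv R C \ reach).erase (r, c)).card := Finset.card_le_card hsub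
      _ < (pvUniv R C \ reach).card := by
          rw [Finset.card_erase_of_mem hp]
          have : 0 < (pvUniv R C \ reach).card := Finset.card_pos.mpr ⟨_, hp⟩
          omega
  · exact ⟨h1, h2⟩

theorem innerB_grow (grid : List (List Int)) (R C : Int) (reach : Finset (Int × Int))
    (r : Int) (hr1 : 0 ≤ r) (hr2 : r < R) (cs : List Int)
    (hcs : ∀ c ∈ cs, 0 ≤ c ∧ c < C) (st : Finset (Int × Int) × Bool)
    (h1 : reach ⊆ st.1)
    (h2 : st.2 = true → (pvUniv R C \ st.1).card < (pvUniv R C \ reach).card) :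
    reach ⊆ (cs.foldl (cellB grid r) st).1 ∧
      ((cs.foldl (cellB grid r) st).2 = true →
        (pvUniv R C \ (cs.foldl (cellB grid r) st).1).card < (pvUniv R C \ reach).card) := by
  induction cs generalizing st with
  | nil => exact ⟨h1, h2⟩
  | cons c cs ih =>
    have hc := hcs c (List.mem_cons_self ..)
    have := cellB_grow grid R C reach r c hr1 hr2 hc.1 hc.2 st h1 h2
    exact ih (fun c hm => hcs c (List.mem_cons_of_mem _ hm)) _ this.1 this.2

theorem passB_grow (grid : List (List Int)) (R C : Int) (reach : Finset (Int × Int)) :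
    reach ⊆ (passB grid R C reach).1 ∧
      ((passB grid R C reach).2 = true →
        (pvUniv R C \ (passB grid R C reach).1).card < (pvUniv R C \ reach).card) := by
  unfold passB
  have : ∀ (rs : List Int), (∀ r ∈ rs, 0 ≤ r ∧ r < R) →
      ∀ (st : Finset (Int × Int) × Bool), reach ⊆ st.1 →
      (st.2 = true → (pvUniv R C \ st.1).card < (pvUniv R C \ reach).card) →
      reach ⊆ (rs.foldl (fun st r => (PySem.List.pyRange 0 C 1).foldl (cellB grid r) st) st).1 ∧
      ((rs.foldl (fun st r => (PySem.List.pyRange 0 C 1).foldl (cellB grid r) st) st).2 = true →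
        (pvUniv R C \ (rs.foldl (fun st r => (PySem.List.pyRange 0 C 1).foldl (cellB grid r) st) st).1).card
          < (pvUniv R C \ reach).card) := by
    intro rs hrs
    induction rs with
    | nil => exact fun st h1 h2 => ⟨h1, h2⟩
    | cons r rs ih =>
      intro st h1 h2
      have hr := hrs r (List.mem_cons_self ..)
      have hin := innerB_grow grid R C reach r hr.1 hr.2 (PySem.List.pyRange 0 C 1)
        (fun c hm => by
          have := (PySem.List.mem_pyRange_one).1 hm
          exact ⟨this.1, this.2⟩) st h1 h2
      exact ih (fun r hm => hrs r (List.mem_cons_of_mem _ hm)) _ hin.1 hin.2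
  exact this (PySem.List.pyRange 0 R 1)
    (fun r hm => by
      have := (PySem.List.mem_pyRange_one).1 hm
      exact ⟨this.1, this.2⟩) (reach, false) (Finset.Subset.refl _) (by simp)

-- B's while-changed loop
def loopB (grid : List (List Int)) (R C : Int) (reach : Finset (Int × Int)) :
    Finset (Int × Int) :=
  let st := passB grid R C reach
  if h : st.2 = true then loopB grid R C st.1 else st.1
termination_by (pvUniv R C \ reach).card
decreasing_by
  exact (passB_grow grid R C reach).2 h

-- B's seeding comprehension: the border zeros
def seedB (grid : List (List Int)) (R C : Int) : Finset (Int × Int) :=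
  (PySem.List.pyRange 0 R 1).foldl (fun s r =>
    (PySem.List.pyRange 0 C 1).foldl (fun s c =>
      if gAt grid r c = 0 ∧ (r = 0 ∨ r = R - 1 ∨ c = 0 ∨ c = C - 1) then insert (r, c) s
      else s) s) ∅

def solve_00d62c1b_alt (grid : List (List Int)) : List (List Int) :=
  let R : Int := grid.length
  let C : Int := (grid.headD []).length
  let reach := loopB grid R C (seedB grid R C)
  -- new = list(row); new[c] = 4 where row[c]==0 and (r,c) not reached (c in range(C))
  grid.mapIdx (fun r row => row.mapIdx (fun c x =>
    if (c : Int) < C ∧ x = 0 ∧ ((r : Int), (c : Int)) ∉ reach then 4 else x))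

-- ===== PRECONDITION & SPEC =====
-- Pre_ excludes exactly the inputs where Python A raises: the empty grid (grid[0] is an
-- IndexError) and grids with a row shorter than row 0 (grid[r][c] raises for c < len(grid[0])).
def Pre_solve_00d62c1b (grid : List (List Int)) : Prop :=
  grid ≠ [] ∧ ∀ row ∈ grid, (grid.headD []).length ≤ row.length
instance (grid : List (List Int)) : Decidable (Pre_solve_00d62c1b grid) := by
  unfold Pre_solve_00d62c1b; infer_instance

def pvWitness_solve_00d62c1b : List (List Int) :=
  [[5, 5, 5, 0], [5, 0, 5, 0], [5, 5, 5, 0]]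

def Spec_solve_00d62c1b (grid : List (List Int)) (out : List (List Int)) : Prop :=
  out = solve_00d62c1b_alt grid
instance (grid : List (List Int)) (out : List (List Int)) :
    Decidable (Spec_solve_00d62c1b grid out) := by unfold Spec_solve_00d62c1b; infer_instance

-- ===== CLAIM (what is proved, stated in full; the proofs are below) =====
def Claim_equal_solve_00d62c1b : Prop := ∀ (grid : List (List Int)),
  Dom_solve_00d62c1b grid → Pre_solve_00d62c1b grid →
  Spec_solve_00d62c1b grid (solve_00d62c1b grid)

-- ===== LEMMAS AND PROOFS =====

-- adjacency of two cells (|dr| + |dc| = 1)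
def Adj (r c r' c' : Int) : Prop :=
  (r' = r ∧ (c' = c + 1 ∨ c' = c - 1)) ∨ (c' = c ∧ (r' = r + 1 ∨ r' = r - 1))

-- the cells both programs mark: zeros connected to a border zero
inductive Reach (grid : List (List Int)) (R C : Int) : Int → Int → Prop
  | border {r c : Int} : 0 ≤ r → r < R → 0 ≤ c → c < C → gAt grid r c = 0 →
      (r = 0 ∨ r = R - 1 ∨ c = 0 ∨ c = C - 1) → Reach grid R C r c
  | step {r c r' c' : Int} : Reach grid R C r c → Adj r c r' c' →
      0 ≤ r' → r' < R → 0 ≤ c' → c' < C → gAt grid r' c' = 0 → Reach grid R C r' c'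

def ClosedAt (grid : List (List Int)) (R C : Int) (v : Finset (Int × Int)) (p : Int × Int) : Prop :=
  ∀ r' c', Adj p.1 p.2 r' c' → 0 ≤ r' → r' < R → 0 ≤ c' → c' < C → gAt grid r' c' = 0 →
    (r', c') ∈ v

def InvA (grid : List (List Int)) (R C : Int)
    (st : Finset (Int × Int) × List (Int × Int)) : Prop :=
  (∀ p ∈ st.2, p ∈ st.1) ∧ (∀ p ∈ st.1, Reach grid R C p.1 p.2) ∧
  (∀ p ∈ st.1, p ∉ st.2 → ClosedAt grid R C st.1 p)

-- ---- A side: generic facts about one BFS expansion step ----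

theorem procA_facts (grid : List (List Int)) (R C : Int) (x : Int × Int)
    (st : Finset (Int × Int) × List (Int × Int)) (d : Int × Int) :
    st.1 ⊆ (procA grid R C x st d).1 ∧
    (∀ p ∈ (procA grid R C x st d).2, p ∈ st.2 ∨ p ∈ (procA grid R C x st d).1) ∧
    (∀ p ∈ st.2, p ∈ (procA grid R C x st d).2) ∧
    (∀ p ∈ (procA grid R C x st d).1, p ∈ st.1 ∨ p ∈ (procA grid R C x st d).2) := by
  simp only [procA]
  split_ifs with h
  · refine ⟨Finset.subset_insert _ _, ?_, ?_, ?_⟩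
    · intro p hp
      rcases List.mem_append.1 hp with hp | hp
      · exact Or.inl hp
      · simp only [List.mem_singleton] at hp
        exact Or.inr (by simp [hp])
    · intro p hp; exact List.mem_append.2 (Or.inl hp)
    · intro p hp
      rcases Finset.mem_insert.1 hp with hp | hp
      · exact Or.inr (List.mem_append.2 (Or.inr (by simp [hp])))
      · exact Or.inl hp
  · exact ⟨Finset.Subset.refl _, fun p hp => Or.inl hp, fun p hp => hp, fun p hp => Or.inl hp⟩

theorem foldA_facts (grid : List (List Int)) (R C : Int) (x : Int × Int)
    (l : List (Int × Int)) (st : Finset (Int × Int) × List (Int × Int)) :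
    st.1 ⊆ (l.foldl (procA grid R C x) st).1 ∧
    (∀ p ∈ (l.foldl (procA grid R C x) st).2, p ∈ st.2 ∨ p ∈ (l.foldl (procA grid R C x) st).1) ∧
    (∀ p ∈ st.2, p ∈ (l.foldl (procA grid R C x) st).2) ∧
    (∀ p ∈ (l.foldl (procA grid R C x) st).1,
      p ∈ st.1 ∨ p ∈ (l.foldl (procA grid R C x) st).2) := by
  induction l generalizing st with
  | nil => exact ⟨Finset.Subset.refl _, fun p hp => Or.inl hp, fun p hp => hp, fun p hp => Or.inl hp⟩
  | cons d l ih =>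
    obtain ⟨p1, p2, p3, p4⟩ := procA_facts grid R C x st d
    obtain ⟨f1, f2, f3, f4⟩ := ih (procA grid R C x st d)
    simp only [List.foldl_cons]
    refine ⟨p1.trans f1, ?_, fun p hp => f3 _ (p3 _ hp), ?_⟩
    · intro p hp
      rcases f2 p hp with hp' | hp'
      · rcases p2 p hp' with h | h
        · exact Or.inl h
        · exact Or.inr (f1 h)
      · exact Or.inr hp'
    · intro p hp
      rcases f4 p hp with hp' | hp'
      · rcases p4 p hp' with h | h
        · exact Or.inl h
        · exact Or.inr (f3 _ h)
      · exact Or.inr hp'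

theorem foldA_sound (grid : List (List Int)) (R C : Int) (x : Int × Int)
    (hx : Reach grid R C x.1 x.2) (l : List (Int × Int))
    (hl : ∀ d ∈ l, Adj x.1 x.2 (x.1 + d.1) (x.2 + d.2))
    (st : Finset (Int × Int) × List (Int × Int))
    (hst : ∀ p ∈ st.1, Reach grid R C p.1 p.2) :
    ∀ p ∈ (l.foldl (procA grid R C x) st).1, Reach grid R C p.1 p.2 := by
  induction l generalizing st with
  | nil => exact hst
  | cons d l ih =>
    refine ih (fun d hd => hl d (List.mem_cons_of_mem _ hd)) _ ?_
    simp only [procA]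
    split_ifs with h
    · intro p hp
      rcases Finset.mem_insert.1 hp with hp | hp
      · subst hp
        exact Reach.step hx (hl d (List.mem_cons_self ..)) h.1 h.2.1 h.2.2.1 h.2.2.2.1 h.2.2.2.2.2
      · exact hst p hp
    · exact hst

theorem procA_after (grid : List (List Int)) (R C : Int) (x : Int × Int)
    (st : Finset (Int × Int) × List (Int × Int)) (d : Int × Int)
    (h1 : 0 ≤ x.1 + d.1) (h2 : x.1 + d.1 < R) (h3 : 0 ≤ x.2 + d.2) (h4 : x.2 + d.2 < C)
    (hz : gAt grid (x.1 + d.1) (x.2 + d.2) = 0) :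
    (x.1 + d.1, x.2 + d.2) ∈ (procA grid R C x st d).1 := by
  simp only [procA]
  split_ifs with h
  · exact Finset.mem_insert_self _ _
  · push Not at h
    by_cases hm : (x.1 + d.1, x.2 + d.2) ∈ st.1
    · exact hm
    · exact absurd hz (h h1 h2 h3 h4 hm)

theorem foldA_after (grid : List (List Int)) (R C : Int) (x : Int × Int)
    (l : List (Int × Int)) (st : Finset (Int × Int) × List (Int × Int)) (d : Int × Int)
    (hd : d ∈ l)
    (h1 : 0 ≤ x.1 + d.1) (h2 : x.1 + d.1 < R) (h3 : 0 ≤ x.2 + d.2) (h4 : x.2 + d.2 < C)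
    (hz : gAt grid (x.1 + d.1) (x.2 + d.2) = 0) :
    (x.1 + d.1, x.2 + d.2) ∈ (l.foldl (procA grid R C x) st).1 := by
  induction l generalizing st with
  | nil => cases hd
  | cons a l ih =>
    simp only [List.foldl_cons]
    rcases List.mem_cons.1 hd with hd' | hd'
    · subst hd'
      exact (foldA_facts grid R C x l _).1 (procA_after grid R C x st d h1 h2 h3 h4 hz)
    · exact ih _ hd'

theorem pvDirs_adj (x : Int × Int) : ∀ d ∈ pvDirs, Adj x.1 x.2 (x.1 + d.1) (x.2 + d.2) := by
  intro d hd
  simp only [pvDirs, List.mem_cons, List.not_mem_nil, or_false] at hd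
  rcases hd with h | h | h | h <;> subst h <;> simp [Adj] <;> omega

theorem adj_mem_pvDirs {r c r' c' : Int} (h : Adj r c r' c') :
    (r' - r, c' - c) ∈ pvDirs ∧ r + (r' - r) = r' ∧ c + (c' - c) = c' := by
  rcases h with ⟨h1, h2 | h2⟩ | ⟨h1, h2 | h2⟩ <;> subst h1 <;> subst h2 <;>
    simp [pvDirs] <;> omega

theorem stepA_inv (grid : List (List Int)) (R C : Int) (v : Finset (Int × Int))
    (x : Int × Int) (rest : List (Int × Int))
    (h : InvA grid R C (v, x :: rest)) :
    InvA grid R C (pvDirs.foldl (procA grid R C x) (v, rest)) := by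
  obtain ⟨h1, h2, h3⟩ := h
  obtain ⟨f1, f2, f3, f4⟩ := foldA_facts grid R C x pvDirs (v, rest)
  have hx : Reach grid R C x.1 x.2 := h2 x (h1 x (List.mem_cons_self ..))
  refine ⟨?_, ?_, ?_⟩
  · intro p hp
    rcases f2 p hp with hp' | hp'
    · exact f1 (h1 p (List.mem_cons_of_mem _ hp'))
    · exact hp'
  · exact foldA_sound grid R C x hx pvDirs (pvDirs_adj x) (v, rest) h2
  · intro p hp hq
    by_cases hpx : p = x
    · subst hpx
      intro r' c' hadj hb1 hb2 hb3 hb4 hz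
      obtain ⟨hd, he1, he2⟩ := adj_mem_pvDirs hadj
      have := foldA_after grid R C p pvDirs (v, rest) (r' - p.1, c' - p.2) hd
        (by simpa [he1] using hb1) (by simpa [he1] using hb2)
        (by simpa [he2] using hb3) (by simpa [he2] using hb4)
        (by simpa [he1, he2] using hz)
      simpa [he1, he2] using this
    · rcases f4 p hp with hpv | hps
      · have hnr : p ∉ rest := fun hm => hq (f3 p hm)
        have := h3 p hpv (by
          simp only [List.mem_cons, not_or]
          exact ⟨hpx, hnr⟩)
        intro r' c' ha b1 b2 b3 b4 hz
        exact f1 (this r' c' ha b1 b2 b3 b4 hz)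
      · exact absurd hps hq

theorem bfsA_mono (grid : List (List Int)) (R C : Int)
    (st : Finset (Int × Int) × List (Int × Int)) : st.1 ⊆ bfsA grid R C st := by
  fun_induction bfsA with
  | case1 st h => exact Finset.Subset.refl _
  | case2 st x rest h ih =>
    exact ((foldA_facts grid R C x pvDirs (st.1, rest)).1).trans ih

theorem bfsA_final (grid : List (List Int)) (R C : Int)
    (st : Finset (Int × Int) × List (Int × Int)) (h : InvA grid R C st) :
    (∀ p ∈ bfsA grid R C st, Reach grid R C p.1 p.2) ∧
    (∀ p ∈ bfsA grid R C st, ClosedAt grid R C (bfsA grid R C st) p) := by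
  fun_induction bfsA with
  | case1 st hq =>
    refine ⟨h.2.1, fun p hp => h.2.2 p hp (by simp [hq])⟩
  | case2 st x rest hq ih =>
    have hst : InvA grid R C (st.1, x :: rest) := by
      have : st = (st.1, st.2) := rfl
      rw [this, hq] at h
      exact h
    exact ih (stepA_inv grid R C st.1 x rest hst)

-- ---- A side: the seeding loop ----

def SeedInv (grid : List (List Int)) (R C : Int)
    (st : Finset (Int × Int) × List (Int × Int)) : Prop :=
  (∀ p ∈ st.1, p ∈ st.2) ∧ (∀ p ∈ st.2, p ∈ st.1) ∧
  (∀ p ∈ st.1, Reach grid R C p.1 p.2)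

theorem seedA_cell (grid : List (List Int)) (R C r c : Int)
    (hr1 : 0 ≤ r) (hr2 : r < R) (hc1 : 0 ≤ c) (hc2 : c < C)
    (st : Finset (Int × Int) × List (Int × Int)) (h : SeedInv grid R C st) :
    SeedInv grid R C
      (if (r = 0 ∨ r = R - 1 ∨ c = 0 ∨ c = C - 1) ∧ gAt grid r c = 0 then
        (if (r, c) ∉ st.1 then (insert (r, c) st.1, st.2 ++ [(r, c)]) else st)
      else st) := by
  obtain ⟨h1, h2, h3⟩ := h
  split_ifs with hg hm
  · exact ⟨h1, h2, h3⟩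
  · refine ⟨?_, ?_, ?_⟩
    · intro p hp
      rcases Finset.mem_insert.1 hp with hp | hp
      · exact List.mem_append.2 (Or.inr (by simp [hp]))
      · exact List.mem_append.2 (Or.inl (h1 p hp))
    · intro p hp
      rcases List.mem_append.1 hp with hp | hp
      · exact Finset.mem_insert_of_mem (h2 p hp)
      · simp only [List.mem_singleton] at hp
        simp [hp]
    · intro p hp
      rcases Finset.mem_insert.1 hp with hp | hp
      · subst hp
        exact Reach.border hr1 hr2 hc1 hc2 hg.2 hg.1
      · exact h3 p hp
  · exact ⟨h1, h2, h3⟩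

theorem seedA_inv (grid : List (List Int)) (R C : Int) :
    SeedInv grid R C (seedA grid R C) := by
  unfold seedA
  have inner : ∀ (r : Int), 0 ≤ r → r < R → ∀ (cs : List Int), (∀ c ∈ cs, 0 ≤ c ∧ c < C) →
      ∀ st, SeedInv grid R C st → SeedInv grid R C
        (cs.foldl (fun st c =>
          if (r = 0 ∨ r = R - 1 ∨ c = 0 ∨ c = C - 1) ∧ gAt grid r c = 0 then
            (if (r, c) ∉ st.1 then (insert (r, c) st.1, st.2 ++ [(r, c)]) else st)
          else st) st) := by
    intro r hr1 hr2 cs hcs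
    induction cs with
    | nil => exact fun st h => h
    | cons c cs ih =>
      intro st h
      have hc := hcs c (List.mem_cons_self ..)
      exact ih (fun c hm => hcs c (List.mem_cons_of_mem _ hm)) _
        (seedA_cell grid R C r c hr1 hr2 hc.1 hc.2 st h)
  have outer : ∀ (rs : List Int), (∀ r ∈ rs, 0 ≤ r ∧ r < R) →
      ∀ st, SeedInv grid R C st → SeedInv grid R C
        (rs.foldl (fun st r =>
          (PySem.List.pyRange 0 C 1).foldl (fun st c =>
            if (r = 0 ∨ r = R - 1 ∨ c = 0 ∨ c = C - 1) ∧ gAt grid r c = 0 then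
              (if (r, c) ∉ st.1 then (insert (r, c) st.1, st.2 ++ [(r, c)]) else st)
            else st) st) st) := by
    intro rs hrs
    induction rs with
    | nil => exact fun st h => h
    | cons r rs ih =>
      intro st h
      have hr := hrs r (List.mem_cons_self ..)
      refine ih (fun r hm => hrs r (List.mem_cons_of_mem _ hm)) _ ?_
      exact inner r hr.1 hr.2 (PySem.List.pyRange 0 C 1)
        (fun c hm => (PySem.List.mem_pyRange_one).1 hm) st h
  exact outer (PySem.List.pyRange 0 R 1)
    (fun r hm => (PySem.List.mem_pyRange_one).1 hm) (∅, [])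
    ⟨by simp, by simp, by simp⟩

theorem seedA_complete (grid : List (List Int)) (R C r c : Int)
    (hr1 : 0 ≤ r) (hr2 : r < R) (hc1 : 0 ≤ c) (hc2 : c < C)
    (hb : r = 0 ∨ r = R - 1 ∨ c = 0 ∨ c = C - 1) (hz : gAt grid r c = 0) :
    (r, c) ∈ (seedA grid R C).1 := by
  unfold seedA
  have cellmono : ∀ (r' : Int) (st : Finset (Int × Int) × List (Int × Int)) (c' : Int),
      st.1 ⊆ ((fun st c =>
        if (r' = 0 ∨ r' = R - 1 ∨ c = 0 ∨ c = C - 1) ∧ gAt grid r' c = 0 then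
          (if (r', c) ∉ st.1 then (insert (r', c) st.1, st.2 ++ [(r', c)]) else st)
        else st) st c').1 := by
    intro r' st c'
    dsimp only
    split_ifs with hg hm
    · exact Finset.Subset.refl st.1
    · exact Finset.subset_insert (r', c') st.1
    · exact Finset.Subset.refl st.1
  have innermono : ∀ (r' : Int) (cs : List Int) (st : Finset (Int × Int) × List (Int × Int)),
      st.1 ⊆ ((cs.foldl (fun st c =>
        if (r' = 0 ∨ r' = R - 1 ∨ c = 0 ∨ c = C - 1) ∧ gAt grid r' c = 0 then
          (if (r', c) ∉ st.1 then (insert (r', c) st.1, st.2 ++ [(r', c)]) else st)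
        else st) st)).1 := by
    intro r' cs
    induction cs with
    | nil => exact fun st => Finset.Subset.refl _
    | cons c' cs ih => exact fun st => (cellmono r' st c').trans (ih _)
  have inner : ∀ (cs : List Int), c ∈ cs → ∀ (st : Finset (Int × Int) × List (Int × Int)),
      (r, c) ∈ ((cs.foldl (fun st c =>
        if (r = 0 ∨ r = R - 1 ∨ c = 0 ∨ c = C - 1) ∧ gAt grid r c = 0 then
          (if (r, c) ∉ st.1 then (insert (r, c) st.1, st.2 ++ [(r, c)]) else st)
        else st) st)).1 := by
    intro cs hc
    induction cs with
    | nil => cases hc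
    | cons c' cs ih =>
      intro st
      rcases List.mem_cons.1 hc with hc' | hc'
      · subst hc'
        refine (innermono r cs _) ?_
        dsimp only
        split_ifs with hg hm
        · exact hm
        · exact Finset.mem_insert_self _ _
        · exact absurd ⟨hb, hz⟩ hg
      · exact ih hc' _
  have outer : ∀ (rs : List Int), r ∈ rs → ∀ (st : Finset (Int × Int) × List (Int × Int)),
      (r, c) ∈ ((rs.foldl (fun st r =>
        (PySem.List.pyRange 0 C 1).foldl (fun st c =>
          if (r = 0 ∨ r = R - 1 ∨ c = 0 ∨ c = C - 1) ∧ gAt grid r c = 0 then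
            (if (r, c) ∉ st.1 then (insert (r, c) st.1, st.2 ++ [(r, c)]) else st)
          else st) st) st)).1 := by
    intro rs hr
    induction rs with
    | nil => cases hr
    | cons r' rs ih =>
      intro st
      rcases List.mem_cons.1 hr with hr' | hr'
      · subst hr'
        have outermono : ∀ (rs' : List Int) (st : Finset (Int × Int) × List (Int × Int)),
            st.1 ⊆ ((rs'.foldl (fun st r =>
              (PySem.List.pyRange 0 C 1).foldl (fun st c =>
                if (r = 0 ∨ r = R - 1 ∨ c = 0 ∨ c = C - 1) ∧ gAt grid r c = 0 then
                  (if (r, c) ∉ st.1 then (insert (r, c) st.1, st.2 ++ [(r, c)]) else st)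
                else st) st) st)).1 := by
          intro rs'
          induction rs' with
          | nil => exact fun st => Finset.Subset.refl _
          | cons a rs' ih' => exact fun st => (innermono a _ st).trans (ih' _)
        refine outermono rs _ ?_
        exact inner (PySem.List.pyRange 0 C 1)
          ((PySem.List.mem_pyRange_one).2 ⟨hc1, hc2⟩) st
      · exact ih hr' _
  exact outer (PySem.List.pyRange 0 R 1) ((PySem.List.mem_pyRange_one).2 ⟨hr1, hr2⟩) (∅, [])

theorem reach_in_A (grid : List (List Int)) (R C : Int) (r c : Int)
    (h : Reach grid R C r c) : (r, c) ∈ bfsA grid R C (seedA grid R C) := by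
  have hinv : InvA grid R C (seedA grid R C) := by
    obtain ⟨h1, h2, h3⟩ := seedA_inv grid R C
    exact ⟨h2, h3, fun p hp hq => absurd (h1 p hp) hq⟩
  induction h with
  | border hr1 hr2 hc1 hc2 hz hb =>
    exact bfsA_mono grid R C _ (seedA_complete grid R C _ _ hr1 hr2 hc1 hc2 hb hz)
  | step hr hadj b1 b2 b3 b4 hz ih =>
    exact (bfsA_final grid R C _ hinv).2 _ ih _ _ hadj b1 b2 b3 b4 hz

-- ---- B side: soundness of a sweep ----

theorem cellB_sound (grid : List (List Int)) (R C r c : Int)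
    (hr1 : 0 ≤ r) (hr2 : r < R) (hc1 : 0 ≤ c) (hc2 : c < C)
    (st : Finset (Int × Int) × Bool) (hst : ∀ p ∈ st.1, Reach grid R C p.1 p.2) :
    ∀ p ∈ (cellB grid r st c).1, Reach grid R C p.1 p.2 := by
  simp only [cellB]
  split_ifs with h
  · intro p hp
    rcases Finset.mem_insert.1 hp with hp | hp
    · subst hp
      obtain ⟨hz, hnm, hnb⟩ := h
      rcases hnb with hn | hn | hn | hn
      · exact Reach.step (hst _ hn) (Or.inr ⟨rfl, Or.inl (by ring)⟩) hr1 hr2 hc1 hc2 hz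
      · exact Reach.step (hst _ hn) (Or.inr ⟨rfl, Or.inr (by ring)⟩) hr1 hr2 hc1 hc2 hz
      · exact Reach.step (hst _ hn) (Or.inl ⟨rfl, Or.inl (by ring)⟩) hr1 hr2 hc1 hc2 hz
      · exact Reach.step (hst _ hn) (Or.inl ⟨rfl, Or.inr (by ring)⟩) hr1 hr2 hc1 hc2 hz
    · exact hst p hp
  · exact hst

theorem passB_sound (grid : List (List Int)) (R C : Int) (reach : Finset (Int × Int))
    (hst : ∀ p ∈ reach, Reach grid R C p.1 p.2) :
    ∀ p ∈ (passB grid R C reach).1, Reach grid R C p.1 p.2 := by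
  unfold passB
  have inner : ∀ (r : Int), 0 ≤ r → r < R → ∀ (cs : List Int), (∀ c ∈ cs, 0 ≤ c ∧ c < C) →
      ∀ (st : Finset (Int × Int) × Bool), (∀ p ∈ st.1, Reach grid R C p.1 p.2) →
      ∀ p ∈ (cs.foldl (cellB grid r) st).1, Reach grid R C p.1 p.2 := by
    intro r hr1 hr2 cs hcs
    induction cs with
    | nil => exact fun st h => h
    | cons c cs ih =>
      intro st h
      have hc := hcs c (List.mem_cons_self ..)
      exact ih (fun c hm => hcs c (List.mem_cons_of_mem _ hm)) _
        (cellB_sound grid R C r c hr1 hr2 hc.1 hc.2 st h)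
  have outer : ∀ (rs : List Int), (∀ r ∈ rs, 0 ≤ r ∧ r < R) →
      ∀ (st : Finset (Int × Int) × Bool), (∀ p ∈ st.1, Reach grid R C p.1 p.2) →
      ∀ p ∈ (rs.foldl (fun st r => (PySem.List.pyRange 0 C 1).foldl (cellB grid r) st) st).1,
        Reach grid R C p.1 p.2 := by
    intro rs hrs
    induction rs with
    | nil => exact fun st h => h
    | cons r rs ih =>
      intro st h
      have hr := hrs r (List.mem_cons_self ..)
      exact ih (fun r hm => hrs r (List.mem_cons_of_mem _ hm)) _
        (inner r hr.1 hr.2 (PySem.List.pyRange 0 C 1)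
          (fun c hm => (PySem.List.mem_pyRange_one).1 hm) st h)
  exact outer (PySem.List.pyRange 0 R 1)
    (fun r hm => (PySem.List.mem_pyRange_one).1 hm) (reach, false) hst

-- ---- B side: a sweep that reports no change changed nothing and saw no firable cell ----

theorem cellB_flag_mono (grid : List (List Int)) (r c : Int)
    (st : Finset (Int × Int) × Bool) (h : st.2 = true) : (cellB grid r st c).2 = true := by
  simp only [cellB]
  split_ifs <;> simp [h]

theorem innerB_flag_mono (grid : List (List Int)) (r : Int) (cs : List Int)
    (st : Finset (Int × Int) × Bool) (h : st.2 = true) :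
    ((cs.foldl (cellB grid r) st)).2 = true := by
  induction cs generalizing st with
  | nil => exact h
  | cons c cs ih => exact ih _ (cellB_flag_mono grid r c st h)

theorem cellB_false (grid : List (List Int)) (r c : Int)
    (st : Finset (Int × Int) × Bool) (h : (cellB grid r st c).2 = false) :
    cellB grid r st c = st ∧
      ¬(gAt grid r c = 0 ∧ (r, c) ∉ st.1 ∧
        ((r - 1, c) ∈ st.1 ∨ (r + 1, c) ∈ st.1 ∨ (r, c - 1) ∈ st.1 ∨ (r, c + 1) ∈ st.1)) := by
  revert h
  simp only [cellB]
  split_ifs with hg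
  · intro h; cases h
  · exact fun _ => ⟨rfl, hg⟩

theorem innerB_false (grid : List (List Int)) (r : Int) (cs : List Int)
    (st : Finset (Int × Int) × Bool) (h : ((cs.foldl (cellB grid r) st)).2 = false) :
    cs.foldl (cellB grid r) st = st ∧
      ∀ c ∈ cs, ¬(gAt grid r c = 0 ∧ (r, c) ∉ st.1 ∧
        ((r - 1, c) ∈ st.1 ∨ (r + 1, c) ∈ st.1 ∨ (r, c - 1) ∈ st.1 ∨ (r, c + 1) ∈ st.1)) := by
  induction cs generalizing st with
  | nil => exact ⟨rfl, by simp⟩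
  | cons c cs ih =>
    simp only [List.foldl_cons] at h ⊢
    have hflag : (cellB grid r st c).2 = false := by
      cases hb : (cellB grid r st c).2 with
      | false => rfl
      | true => rw [innerB_flag_mono grid r cs _ hb] at h; cases h
    obtain ⟨heq, hg⟩ := cellB_false grid r c st hflag
    rw [heq] at h ⊢
    obtain ⟨h1, h2⟩ := ih st h
    refine ⟨h1, ?_⟩
    intro c' hc'
    rcases List.mem_cons.1 hc' with hc' | hc'
    · subst hc'; exact hg
    · exact h2 c' hc'

theorem passB_false (grid : List (List Int)) (R C : Int) (reach : Finset (Int × Int))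
    (h : (passB grid R C reach).2 = false) :
    (passB grid R C reach).1 = reach ∧
      ∀ r c : Int, 0 ≤ r → r < R → 0 ≤ c → c < C →
        ¬(gAt grid r c = 0 ∧ (r, c) ∉ reach ∧
          ((r - 1, c) ∈ reach ∨ (r + 1, c) ∈ reach ∨ (r, c - 1) ∈ reach ∨ (r, c + 1) ∈ reach)) := by
  unfold passB at h ⊢
  have outer : ∀ (rs : List Int) (st : Finset (Int × Int) × Bool),
      ((rs.foldl (fun st r => (PySem.List.pyRange 0 C 1).foldl (cellB grid r) st) st)).2 = false →
      rs.foldl (fun st r => (PySem.List.pyRange 0 C 1).foldl (cellB grid r) st) st = st ∧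
      ∀ r ∈ rs, ∀ c ∈ PySem.List.pyRange 0 C 1,
        ¬(gAt grid r c = 0 ∧ (r, c) ∉ st.1 ∧
          ((r - 1, c) ∈ st.1 ∨ (r + 1, c) ∈ st.1 ∨ (r, c - 1) ∈ st.1 ∨ (r, c + 1) ∈ st.1)) := by
    intro rs
    induction rs with
    | nil => exact fun st _ => ⟨rfl, by simp⟩
    | cons r rs ih =>
      intro st h'
      simp only [List.foldl_cons] at h' ⊢
      have hflag : ((PySem.List.pyRange 0 C 1).foldl (cellB grid r) st).2 = false := by
        cases hb : ((PySem.List.pyRange 0 C 1).foldl (cellB grid r) st).2 with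
        | false => rfl
        | true =>
          have : ∀ (rs' : List Int) (st' : Finset (Int × Int) × Bool), st'.2 = true →
              ((rs'.foldl (fun st r => (PySem.List.pyRange 0 C 1).foldl (cellB grid r) st) st')).2
                = true := by
            intro rs'
            induction rs' with
            | nil => exact fun _ h => h
            | cons a rs' ih' =>
              exact fun st' h'' => ih' _ (innerB_flag_mono grid a (PySem.List.pyRange 0 C 1) st' h'')
          rw [this rs _ hb] at h'; cases h'
      obtain ⟨heq, hg⟩ := innerB_false grid r (PySem.List.pyRange 0 C 1) st hflag
      rw [heq] at h' ⊢
      obtain ⟨h1, h2⟩ := ih st h'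
      refine ⟨h1, ?_⟩
      intro r' hr'
      rcases List.mem_cons.1 hr' with hr' | hr'
      · subst hr'; exact hg
      · exact h2 r' hr'
  obtain ⟨h1, h2⟩ := outer (PySem.List.pyRange 0 R 1) (reach, false) h
  refine ⟨by rw [h1], ?_⟩
  intro r c b1 b2 b3 b4
  exact h2 r ((PySem.List.mem_pyRange_one).2 ⟨b1, b2⟩) c ((PySem.List.mem_pyRange_one).2 ⟨b3, b4⟩)

-- ---- B side: the while-changed loop ----

theorem loopB_mono (grid : List (List Int)) (R C : Int) (reach : Finset (Int × Int)) :
    reach ⊆ loopB grid R C reach := by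
  fun_induction loopB with
  | case1 reach st h =>
    rename_i ih
    exact ((passB_grow grid R C reach).1).trans ih
  | case2 reach st => exact (passB_grow grid R C reach).1

theorem loopB_sound (grid : List (List Int)) (R C : Int) (reach : Finset (Int × Int))
    (hst : ∀ p ∈ reach, Reach grid R C p.1 p.2) :
    ∀ p ∈ loopB grid R C reach, Reach grid R C p.1 p.2 := by
  fun_induction loopB with
  | case1 reach st h =>
    rename_i ih
    exact fun p hp => ih (passB_sound grid R C reach hst) p hp
  | case2 reach st => exact fun p hp => passB_sound grid R C reach hst p hp

theorem loopB_fix (grid : List (List Int)) (R C : Int) (reach : Finset (Int × Int)) :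
    passB grid R C (loopB grid R C reach) = (loopB grid R C reach, false) := by
  fun_induction loopB with
  | case1 reach st h =>
    rename_i ih
    exact ih
  | case2 reach st =>
    rename_i h
    have hflag : (passB grid R C reach).2 = false := by
      cases hb : (passB grid R C reach).2 with
      | false => rfl
      | true => exact absurd hb h
    have h1 := (passB_false grid R C reach hflag).1
    have : passB grid R C reach = ((passB grid R C reach).1, (passB grid R C reach).2) := rfl
    rw [h1]
    rw [this, h1, hflag]

-- ---- B side: the seeding loop ----

theorem seedB_sound (grid : List (List Int)) (R C : Int) :
    ∀ p ∈ seedB grid R C, Reach grid R C p.1 p.2 := by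
  unfold seedB
  have inner : ∀ (r : Int), 0 ≤ r → r < R → ∀ (cs : List Int), (∀ c ∈ cs, 0 ≤ c ∧ c < C) →
      ∀ (s : Finset (Int × Int)), (∀ p ∈ s, Reach grid R C p.1 p.2) →
      ∀ p ∈ (cs.foldl (fun s c =>
          if gAt grid r c = 0 ∧ (r = 0 ∨ r = R - 1 ∨ c = 0 ∨ c = C - 1) then insert (r, c) s
          else s) s), Reach grid R C p.1 p.2 := by
    intro r hr1 hr2 cs hcs
    induction cs with
    | nil => exact fun s h => h
    | cons c cs ih =>
      intro s h
      have hc := hcs c (List.mem_cons_self ..)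
      refine ih (fun c hm => hcs c (List.mem_cons_of_mem _ hm)) _ ?_
      dsimp only
      split_ifs with hg
      · intro p hp
        rcases Finset.mem_insert.1 hp with hp | hp
        · subst hp
          exact Reach.border hr1 hr2 hc.1 hc.2 hg.1 hg.2
        · exact h p hp
      · exact h
  have outer : ∀ (rs : List Int), (∀ r ∈ rs, 0 ≤ r ∧ r < R) →
      ∀ (s : Finset (Int × Int)), (∀ p ∈ s, Reach grid R C p.1 p.2) →
      ∀ p ∈ (rs.foldl (fun s r =>
          (PySem.List.pyRange 0 C 1).foldl (fun s c =>
            if gAt grid r c = 0 ∧ (r = 0 ∨ r = R - 1 ∨ c = 0 ∨ c = C - 1) then insert (r, c) s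
            else s) s) s), Reach grid R C p.1 p.2 := by
    intro rs hrs
    induction rs with
    | nil => exact fun s h => h
    | cons r rs ih =>
      intro s h
      have hr := hrs r (List.mem_cons_self ..)
      exact ih (fun r hm => hrs r (List.mem_cons_of_mem _ hm)) _
        (inner r hr.1 hr.2 (PySem.List.pyRange 0 C 1)
          (fun c hm => (PySem.List.mem_pyRange_one).1 hm) s h)
  exact outer (PySem.List.pyRange 0 R 1)
    (fun r hm => (PySem.List.mem_pyRange_one).1 hm) ∅ (by simp)

theorem seedB_complete (grid : List (List Int)) (R C r c : Int)
    (hr1 : 0 ≤ r) (hr2 : r < R) (hc1 : 0 ≤ c) (hc2 : c < C)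
    (hb : r = 0 ∨ r = R - 1 ∨ c = 0 ∨ c = C - 1) (hz : gAt grid r c = 0) :
    (r, c) ∈ seedB grid R C := by
  unfold seedB
  have innermono : ∀ (r' : Int) (cs : List Int) (s : Finset (Int × Int)),
      s ⊆ (cs.foldl (fun s c =>
        if gAt grid r' c = 0 ∧ (r' = 0 ∨ r' = R - 1 ∨ c = 0 ∨ c = C - 1) then insert (r', c) s
        else s) s) := by
    intro r' cs
    induction cs with
    | nil => exact fun s => Finset.Subset.refl _
    | cons c' cs ih =>
      intro s
      refine Finset.Subset.trans ?_ (ih _)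
      dsimp only
      split_ifs with hg
      · exact Finset.subset_insert _ _
      · exact Finset.Subset.refl _
  have inner : ∀ (cs : List Int), c ∈ cs → ∀ (s : Finset (Int × Int)),
      (r, c) ∈ (cs.foldl (fun s c =>
        if gAt grid r c = 0 ∧ (r = 0 ∨ r = R - 1 ∨ c = 0 ∨ c = C - 1) then insert (r, c) s
        else s) s) := by
    intro cs hc
    induction cs with
    | nil => cases hc
    | cons c' cs ih =>
      intro s
      rcases List.mem_cons.1 hc with hc' | hc'
      · subst hc'
        refine innermono r cs _ ?_
        dsimp only
        split_ifs with hg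
        · exact Finset.mem_insert_self _ _
        · exact absurd ⟨hz, hb⟩ hg
      · exact ih hc' _
  have outermono : ∀ (rs : List Int) (s : Finset (Int × Int)),
      s ⊆ (rs.foldl (fun s r =>
        (PySem.List.pyRange 0 C 1).foldl (fun s c =>
          if gAt grid r c = 0 ∧ (r = 0 ∨ r = R - 1 ∨ c = 0 ∨ c = C - 1) then insert (r, c) s
          else s) s) s) := by
    intro rs
    induction rs with
    | nil => exact fun s => Finset.Subset.refl _
    | cons a rs ih => exact fun s => Finset.Subset.trans (innermono a _ s) (ih _)
  have outer : ∀ (rs : List Int), r ∈ rs → ∀ (s : Finset (Int × Int)),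
      (r, c) ∈ (rs.foldl (fun s r =>
        (PySem.List.pyRange 0 C 1).foldl (fun s c =>
          if gAt grid r c = 0 ∧ (r = 0 ∨ r = R - 1 ∨ c = 0 ∨ c = C - 1) then insert (r, c) s
          else s) s) s) := by
    intro rs hr
    induction rs with
    | nil => cases hr
    | cons r' rs ih =>
      intro s
      rcases List.mem_cons.1 hr with hr' | hr'
      · subst hr'
        exact outermono rs _ (inner (PySem.List.pyRange 0 C 1)
          ((PySem.List.mem_pyRange_one).2 ⟨hc1, hc2⟩) s)
      · exact ih hr' _
  exact outer (PySem.List.pyRange 0 R 1) ((PySem.List.mem_pyRange_one).2 ⟨hr1, hr2⟩) ∅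

theorem reach_in_B (grid : List (List Int)) (R C : Int) (r c : Int)
    (h : Reach grid R C r c) : (r, c) ∈ loopB grid R C (seedB grid R C) := by
  induction h with
  | border hr1 hr2 hc1 hc2 hz hb =>
    exact loopB_mono grid R C _ (seedB_complete grid R C _ _ hr1 hr2 hc1 hc2 hb hz)
  | @step r0 c0 r' c' hr hadj b1 b2 b3 b4 hz ih =>
    by_contra hn
    have hflag : (passB grid R C (loopB grid R C (seedB grid R C))).2 = false := by
      rw [loopB_fix]
    have hcl := (passB_false grid R C _ hflag).2 r' c' b1 b2 b3 b4
    apply hcl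
    refine ⟨hz, hn, ?_⟩
    rcases hadj with ⟨h1', h2' | h2'⟩ | ⟨h1', h2' | h2'⟩
    · exact Or.inr (Or.inr (Or.inl (by rw [h1', h2']; simpa using ih)))
    · exact Or.inr (Or.inr (Or.inr (by rw [h1', h2']; simpa using ih)))
    · exact Or.inl (by rw [h1', h2']; simpa using ih)
    · exact Or.inr (Or.inl (by rw [h1', h2']; simpa using ih))

-- ---- the two marked sets coincide ----

theorem sets_eq (grid : List (List Int)) (R C : Int) :
    bfsA grid R C (seedA grid R C) = loopB grid R C (seedB grid R C) := by
  apply Finset.ext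
  intro p
  constructor
  · intro hp
    have hinv : InvA grid R C (seedA grid R C) := by
      obtain ⟨h1, h2, h3⟩ := seedA_inv grid R C
      exact ⟨h2, h3, fun p hp hq => absurd (h1 p hp) hq⟩
    have := (bfsA_final grid R C _ hinv).1 p hp
    exact reach_in_B grid R C p.1 p.2 this
  · intro hp
    have := loopB_sound grid R C _ (seedB_sound grid R C) p hp
    exact reach_in_A grid R C p.1 p.2 this

-- ===== VERDICT (by name: the statement is the Claim_ definition above) =====
theorem solve_00d62c1b_spec : Claim_equal_solve_00d62c1b := by
  intro grid _ _
  unfold Spec_solve_00d62c1b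
  simp only [solve_00d62c1b, solve_00d62c1b_alt]
  rw [sets_eq grid (grid.length : Int) ((grid.headD []).length : Int)]
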